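-- pv_equiv track=rewrite | github.com/joshplotkin/modeling-football-outcomes-2019 | model_pipeline/CVData.py | get_rolling_dict_given_order
-- ===== SOURCE A (Python) =====
-- from collections import OrderedDict
--
-- def get_rolling_dict_given_order(keys_ordered, props):
--     rolling_sum = 0
--     rolling = OrderedDict()
--     for k in keys_ordered:
--         v = props[k]
--         rolling[k] = (rolling_sum, rolling_sum + v)
--         rolling_sum += v
--     return rolling
-- ===== SOURCE B (Python) =====
-- from collections import OrderedDict
--
--
-- def get_rolling_dict_given_order(keys_ordered, props):
--     def intervals(keys, start):
--         if not keys: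
--             return []
--         k = keys[0]
--         v = props[k]
--         return [(k, (start, start + v))] + intervals(keys[1:], start + v)
--     return OrderedDict(intervals(keys_ordered, 0))
-- ===== Notes on version B (the rewrite author's own statement) =====
-- stated objective: alternative
-- what changed: Replaces A's imperative loop that mutates a running sum and the dict together with a pure recursion over the key list that returns the whole association list of intervals, the dict being constructed once at the end from that list.
import Mathlib
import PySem

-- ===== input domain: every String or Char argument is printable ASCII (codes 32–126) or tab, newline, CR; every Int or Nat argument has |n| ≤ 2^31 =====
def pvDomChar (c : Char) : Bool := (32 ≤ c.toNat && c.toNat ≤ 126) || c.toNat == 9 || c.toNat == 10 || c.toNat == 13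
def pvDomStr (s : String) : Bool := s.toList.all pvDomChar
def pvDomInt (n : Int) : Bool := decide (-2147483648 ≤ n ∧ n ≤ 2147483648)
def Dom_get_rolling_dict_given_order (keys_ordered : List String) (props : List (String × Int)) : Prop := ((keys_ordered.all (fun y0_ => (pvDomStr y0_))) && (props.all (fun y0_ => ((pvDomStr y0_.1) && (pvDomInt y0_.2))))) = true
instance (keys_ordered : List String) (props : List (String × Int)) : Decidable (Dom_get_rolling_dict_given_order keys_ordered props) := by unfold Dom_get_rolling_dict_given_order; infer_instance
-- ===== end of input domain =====

-- B replaces A's imperative loop (mutating a running sum and the dict together) with a pure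
-- recursion over the key list returning the whole interval association list, the dict being
-- built once at the end; same O(n) cost, a different decomposition.

-- ===== PORT A =====
-- A: one loop, mutating rolling_sum and the ordered dict together.
-- props[k] on a missing key is a KeyError (excluded by Pre_); there the port reads the lookup with default 0.
def get_rolling_dict_given_order (keys_ordered : List String) (props : List (String × Int)) : List (String × Int × Int) :=
  (keys_ordered.foldl
    (fun (st : Int × PySem.Dict String (Int × Int)) k =>
      let v := ((PySem.Dict.mk props).get? k).getD 0
      (st.1 + v, st.2.insert k (st.1, st.1 + v)))
    ((0 : Int), PySem.Dict.empty)).2.items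

-- ===== PORT B =====
-- the inner recursive helper 'intervals(keys, start)' of Source B
def pvIntervals (props : List (String × Int)) : List String → Int → List (String × (Int × Int))
  | [], _ => []
  | k :: ks, start =>
    let v := ((PySem.Dict.mk props).get? k).getD 0
    [(k, (start, start + v))] ++ pvIntervals props ks (start + v)

def get_rolling_dict_given_order_alt (keys_ordered : List String) (props : List (String × Int)) : List (String × Int × Int) :=
  (PySem.Dict.ofList (pvIntervals props keys_ordered 0)).items

-- ===== PRECONDITION & SPEC =====
-- Pre_ excludes exactly the inputs where Python's props[k] raises KeyError (a key of
-- keys_ordered absent from props); both A and B raise there.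
def Pre_get_rolling_dict_given_order (keys_ordered : List String) (props : List (String × Int)) : Prop :=
  ∀ k ∈ keys_ordered, k ∈ props.map Prod.fst
instance (keys_ordered : List String) (props : List (String × Int)) : Decidable (Pre_get_rolling_dict_given_order keys_ordered props) := by unfold Pre_get_rolling_dict_given_order; infer_instance

def pvWitness_get_rolling_dict_given_order : List String × (List (String × Int)) :=
  (["a", "b", "a"], [("a", 2), ("b", 3)])

def Spec_get_rolling_dict_given_order (keys_ordered : List String) (props : List (String × Int)) (out : List (String × Int × Int)) : Prop := out = get_rolling_dict_given_order_alt keys_ordered props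
instance (keys_ordered : List String) (props : List (String × Int)) (out : List (String × Int × Int)) : Decidable (Spec_get_rolling_dict_given_order keys_ordered props out) := by unfold Spec_get_rolling_dict_given_order; infer_instance

-- ===== CLAIM (what is proved, stated in full; the proofs are below) =====
def Claim_equal_get_rolling_dict_given_order : Prop := ∀ (keys_ordered : List String) (props : List (String × Int)), Dom_get_rolling_dict_given_order keys_ordered props → Pre_get_rolling_dict_given_order keys_ordered props → Spec_get_rolling_dict_given_order keys_ordered props (get_rolling_dict_given_order keys_ordered props)

-- ===== LEMMAS AND PROOFS =====

-- A's fold inserts, one by one, exactly the pairs that B's recursion lists.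
lemma foldA_eq_foldl_intervals (props : List (String × Int)) :
    ∀ (keys : List String) (s : Int) (d : PySem.Dict String (Int × Int)),
      (keys.foldl
        (fun (st : Int × PySem.Dict String (Int × Int)) k =>
          let v := ((PySem.Dict.mk props).get? k).getD 0
          (st.1 + v, st.2.insert k (st.1, st.1 + v))) (s, d)).2
      = (pvIntervals props keys s).foldl (fun d p => d.insert p.1 p.2) d := by
  intro keys
  induction keys with
  | nil => intro s d; simp [pvIntervals]
  | cons k ks ih =>
    intro s d
    simp only [List.foldl_cons, pvIntervals, List.singleton_append]
    exact ih _ _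

-- ===== VERDICT (by name: the statement is the Claim_ definition above) =====
theorem get_rolling_dict_given_order_spec : Claim_equal_get_rolling_dict_given_order := by
  intro keys props _ _
  unfold Spec_get_rolling_dict_given_order
  unfold get_rolling_dict_given_order get_rolling_dict_given_order_alt
  rw [foldA_eq_foldl_intervals props keys 0 PySem.Dict.empty]
  rfl
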